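-- pv_equiv track=rewrite | github.com/Jackson-Sherman/Misc | python/logic/testing.py | varParse
-- ===== SOURCE A (Python) =====
-- def varParse(funs):
--     order = "AaBbCcDdEeFfGgHhIiJjKkLlMmNnOoPpQqRrSsTtUuVvWwXxYyZz"
--     vars = tuple()
--     for f in funs:
--         este = set(f)
--         for char in este:
--             if char in order:
--                 vars = insertion(char,vars)
--     return vars
--
-- def insertion(v,t):
--     order = "AaBbCcDdEeFfGgHhIiJjKkLlMmNnOoPpQqRrSsTtUuVvWwXxYyZz"
--     if len(t) < 1:
--         return v,
--     if order.index(v) == order.index(t[0]):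
--         return t
--     elif order.index(v) < order.index(t[0]):
--         return (v,) + t
--     return t[:1] + insertion(v,t[1:])
-- ===== SOURCE B (Python) =====
-- def varParse(funs):
--     order = "AaBbCcDdEeFfGgHhIiJjKkLlMmNnOoPpQqRrSsTtUuVvWwXxYyZz"
--     present = set()
--     for f in funs:
--         present.update(f)
--     return tuple(c for c in order if c in present)
-- ===== Notes on version B (the rewrite author's own statement) =====
-- stated objective: simpler
-- what changed: Replaces the per-character recursive insertion-sort (repeated order.index scans on a growing tuple, rebuilt via tuple concatenation) by one union set of all characters plus a single left-to-right scan of the fixed 52-char alphabet string, emitting the characters present in the set.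
import Mathlib
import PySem

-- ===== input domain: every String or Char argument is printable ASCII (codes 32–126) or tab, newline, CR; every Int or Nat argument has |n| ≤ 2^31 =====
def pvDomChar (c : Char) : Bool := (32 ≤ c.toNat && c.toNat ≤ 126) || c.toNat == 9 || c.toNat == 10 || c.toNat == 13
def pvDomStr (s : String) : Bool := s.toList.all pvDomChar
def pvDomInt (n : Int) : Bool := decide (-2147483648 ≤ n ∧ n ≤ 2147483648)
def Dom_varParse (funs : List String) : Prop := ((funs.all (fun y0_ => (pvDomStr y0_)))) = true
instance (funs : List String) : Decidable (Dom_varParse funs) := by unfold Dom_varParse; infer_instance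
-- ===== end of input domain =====

-- B replaces A's per-character recursive insertion-sort by one union set of all characters
-- plus a single scan of the fixed alphabet string (objective: simpler); same return value.

-- ===== PORT A =====
def pvOrder : String := "AaBbCcDdEeFfGgHhIiJjKkLlMmNnOoPpQqRrSsTtUuVvWwXxYyZz"

-- order.index(v) is ported as PySem.Str.find (exact where the substring occurs; varParse only
-- calls insertion with characters of pvOrder, where .index and .find agree).
def insertion (v : String) (t : List String) : List String :=
  match t with
  | [] => [v]
  | h :: rest =>
    if PySem.Str.find pvOrder v == PySem.Str.find pvOrder h then h :: rest
    else if PySem.Str.find pvOrder v < PySem.Str.find pvOrder h then v :: h :: rest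
    else h :: insertion v rest

-- 'for char in este' iterates a Python set; the port iterates PySem.Set.ofList's order —
-- the final value is order-independent (the tuple is kept sorted by insertion).
def varParse (funs : List String) : List String :=
  funs.foldl (fun vars f =>
    (PySem.Set.ofList f.toList).foldl (fun vars c =>
      if PySem.Str.isIn (String.ofList [c]) pvOrder then insertion (String.ofList [c]) vars else vars)
      vars) []

-- ===== PORT B =====
def varParse_alt (funs : List String) : List String :=
  let present := funs.foldl (fun s f => PySem.Set.update s f.toList) PySem.Set.empty
  (pvOrder.toList.filter (fun c => PySem.Set.contains present c)).map (fun c => String.ofList [c])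

-- ===== PRECONDITION & SPEC =====
def Spec_varParse (funs : List String) (out : List String) : Prop := out = varParse_alt funs
instance (funs : List String) (out : List String) : Decidable (Spec_varParse funs out) := by unfold Spec_varParse; infer_instance

-- ===== CLAIM (what is proved, stated in full; the proofs are below) =====
def Claim_equal_varParse : Prop := ∀ (funs : List String), Dom_varParse funs → Spec_varParse funs (varParse funs)

-- ===== LEMMAS AND PROOFS =====

def pvIdx (c : Char) : Int := PySem.Str.find pvOrder (String.ofList [c])

def pvSing (c : Char) : String := String.ofList [c]

def pvCanon (p : Char → Bool) : List String :=
  (pvOrder.toList.filter p).map (fun c => String.ofList [c])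

def insIdx (c : Char) : List Char → List Char
  | [] => [c]
  | h :: t =>
    if pvIdx c = pvIdx h then h :: t
    else if pvIdx c < pvIdx h then c :: h :: t
    else h :: insIdx c t

lemma pairwise_order : pvOrder.toList.Pairwise (fun a b => pvIdx a < pvIdx b) := by
  have e : pvOrder.toList.map pvIdx = (List.range 52).map Int.ofNat := by decide
  have h : (List.map Int.ofNat (List.range 52)).Pairwise (· < ·) :=
    List.pairwise_lt_range.map Int.ofNat (by intro a b h; exact Int.ofNat_lt.mpr h)
  exact List.pairwise_map.mp (by rw [e]; exact h)

lemma insertion_map (c : Char) : ∀ l : List Char,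
    insertion (String.ofList [c]) (l.map (fun d => String.ofList [d]))
      = (insIdx c l).map (fun d => String.ofList [d]) := by
  intro l
  induction l with
  | nil => rfl
  | cons h t ih =>
    simp only [List.map_cons, insertion, insIdx, pvIdx, beq_iff_eq]
    split_ifs with h1 h2
    · rfl
    · rfl
    · rw [List.map_cons]
      exact congrArg _ ih

lemma insIdx_filter (c : Char) (p : Char → Bool) : ∀ L : List Char,
    L.Pairwise (fun a b => pvIdx a < pvIdx b) → c ∈ L →
    insIdx c (L.filter p) = L.filter (fun x => x == c || p x) := by
  intro L
  induction L with
  | nil => intro _ hc; exact absurd hc List.not_mem_nil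
  | cons h t ih =>
    intro hpw hc
    have hlt := (List.pairwise_cons.mp hpw).1
    have hpw' := (List.pairwise_cons.mp hpw).2
    rcases List.mem_cons.mp hc with rfl | hct
    · -- c is the head of L
      have hne : ∀ x ∈ t, (x == c) = false := by
        intro x hx
        exact beq_eq_false_iff_ne.mpr (fun e => absurd (e ▸ hlt x hx) (lt_irrefl _))
      have hfilt : t.filter (fun x => x == c || p x) = t.filter p :=
        List.filter_congr (by intro x hx; simp [hne x hx])
      by_cases hp : p c
      · rw [List.filter_cons_of_pos hp, List.filter_cons_of_pos (by simp [hp]), hfilt]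
        simp [insIdx]
      · rw [List.filter_cons_of_neg (by simpa using hp),
          List.filter_cons_of_pos (by simp), hfilt]
        cases hft : t.filter p with
        | nil => simp [insIdx]
        | cons h' t' =>
          have hh' : h' ∈ t := (List.mem_filter.mp (hft ▸ List.mem_cons_self)).1
          have hlt2 : pvIdx c < pvIdx h' := hlt h' hh'
          simp only [insIdx]
          rw [if_neg (ne_of_lt hlt2), if_pos hlt2]
    · -- c is in the tail of L
      have hlt' : pvIdx h < pvIdx c := hlt c hct
      have hhc : (h == c) = false :=
        beq_eq_false_iff_ne.mpr (fun e => absurd (e ▸ hlt') (lt_irrefl _))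
      by_cases hp : p h
      · rw [List.filter_cons_of_pos hp, List.filter_cons_of_pos (by simp [hhc, hp])]
        simp only [insIdx]
        rw [if_neg (ne_of_gt hlt'), if_neg (asymm hlt'), ih hpw' hct]
      · rw [List.filter_cons_of_neg (by simpa using hp),
          List.filter_cons_of_neg (by simp [hhc, hp]), ih hpw' hct]

lemma step_canon (c : Char) (p : Char → Bool) (hc : c ∈ pvOrder.toList) :
    insertion (String.ofList [c]) (pvCanon p) = pvCanon (fun x => x == c || p x) := by
  unfold pvCanon
  rw [insertion_map, insIdx_filter c p _ pairwise_order hc]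

lemma isIn_sing (c : Char) :
    PySem.Str.isIn (String.ofList [c]) pvOrder = pvOrder.toList.contains c := by
  rw [Bool.eq_iff_iff, PySem.Str.isIn_iff_infix, List.contains_iff_mem]
  constructor
  · intro h
    exact h.sublist.subset (by simp)
  · intro h
    obtain ⟨s, t, hst⟩ := List.append_of_mem h
    exact ⟨s, t, by simp [hst]⟩

lemma fold_canon (cs : List Char) : ∀ p : Char → Bool,
    cs.foldl (fun vars c =>
        if PySem.Str.isIn (String.ofList [c]) pvOrder then insertion (String.ofList [c]) vars else vars)
      (pvCanon p)
    = pvCanon (fun x => cs.contains x || p x) := by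
  induction cs with
  | nil => intro p; simp
  | cons c cs ih =>
    intro p
    simp only [List.foldl_cons]
    by_cases hc : c ∈ pvOrder.toList
    · have hin : PySem.Str.isIn (String.ofList [c]) pvOrder = true := by
        rw [isIn_sing]; exact List.contains_iff_mem.mpr hc
      rw [if_pos hin, step_canon c p hc, ih]
      apply congrArg
      funext x
      by_cases hx : x = c
      · subst hx; simp
      · by_cases hcsx : x ∈ cs <;>
          simp [List.contains_cons, hcsx, hx]
    · have hin : ¬ PySem.Str.isIn (String.ofList [c]) pvOrder = true := by
        rw [isIn_sing]; exact fun e => hc (List.contains_iff_mem.mp e)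
      rw [if_neg hin, ih]
      unfold pvCanon
      apply congrArg
      apply List.filter_congr
      intro x hx
      have hne : x ≠ c := fun e => hc (e ▸ hx)
      simp [hne]

lemma setOfList_contains (l : List Char) (x : Char) :
    List.contains (PySem.Set.ofList l) x = List.contains l x := by
  rw [Bool.eq_iff_iff, List.contains_iff_mem, List.contains_iff_mem]
  exact PySem.Set.mem_ofList l x

lemma varParse_canon (funs : List String) : ∀ p : Char → Bool,
    funs.foldl (fun vars f =>
      (PySem.Set.ofList f.toList).foldl (fun vars c =>
        if PySem.Str.isIn (String.ofList [c]) pvOrder then insertion (String.ofList [c]) vars else vars)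
        vars) (pvCanon p)
    = pvCanon (fun x => funs.any (fun f => f.toList.contains x) || p x) := by
  induction funs with
  | nil => intro p; simp
  | cons f fs ih =>
    intro p
    simp only [List.foldl_cons]
    rw [fold_canon, ih]
    apply congrArg
    funext x
    rw [setOfList_contains]
    simp only [List.any_cons]
    rw [Bool.or_left_comm, ← Bool.or_assoc]

lemma present_contains (funs : List String) : ∀ s : PySem.Set Char, ∀ x : Char,
    (funs.foldl (fun s f => PySem.Set.update s f.toList) s).contains x
      = (s.contains x || funs.any (fun f => f.toList.contains x)) := by
  induction funs with
  | nil => intro s x; simp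
  | cons f fs ih =>
    intro s x
    simp only [List.foldl_cons, ih, List.any_cons]
    rw [Bool.eq_iff_iff]
    simp [PySem.Set.mem_update, or_assoc]

-- ===== VERDICT (by name: the statement is the Claim_ definition above) =====
theorem varParse_spec : Claim_equal_varParse := by
  intro funs _
  show varParse funs = varParse_alt funs
  unfold varParse varParse_alt
  rw [show ([] : List String) = pvCanon (fun _ => false) from by simp [pvCanon],
    varParse_canon]
  unfold pvCanon
  apply congrArg
  apply List.filter_congr
  intro x _
  rw [present_contains]
  simp [PySem.Set.empty]
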